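-- pv_equiv track=rewrite | github.com/ogaogs/receipt-scanner-model | src/receipt_scanner_model/analyze.py | dict_max
-- ===== SOURCE A (Python) =====
-- def dict_max(count_amount_dict: dict[int, int]) -> int:
--     """合計金額となり得るものを数字の個数や、大きさから判断する
--
--     Args:
--         count_amount_dict (dict[int, int]): keyに抽出された数字、valueに抽出された回数
--
--     Returns:
--         int: 最も合計らしい数字
--     """
--     max_counts_list = [
--         k for k, v in count_amount_dict.items() if v == max(count_amount_dict.values())
--     ]
--     dict_len = len(max_counts_list)
--     match dict_len:
--         case 0:
--             return 0
--         case 1: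
--             return max_counts_list[0]
--         case _:
--             return max(max_counts_list)
-- ===== SOURCE B (Python) =====
-- def dict_max(count_amount_dict: dict[int, int]) -> int:
--     if not count_amount_dict:
--         return 0
--     return max(count_amount_dict, key=lambda k: (count_amount_dict[k], k))
-- ===== Notes on version B (the rewrite author's own statement) =====
-- stated objective: faster
-- what changed: Replaced A's two-phase scan (a filter that recomputes max(values) for every entry, then a max over the surviving keys) by a single max over the keys with the lexicographic key (count, key), plus an empty-dict guard.
import Mathlib
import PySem

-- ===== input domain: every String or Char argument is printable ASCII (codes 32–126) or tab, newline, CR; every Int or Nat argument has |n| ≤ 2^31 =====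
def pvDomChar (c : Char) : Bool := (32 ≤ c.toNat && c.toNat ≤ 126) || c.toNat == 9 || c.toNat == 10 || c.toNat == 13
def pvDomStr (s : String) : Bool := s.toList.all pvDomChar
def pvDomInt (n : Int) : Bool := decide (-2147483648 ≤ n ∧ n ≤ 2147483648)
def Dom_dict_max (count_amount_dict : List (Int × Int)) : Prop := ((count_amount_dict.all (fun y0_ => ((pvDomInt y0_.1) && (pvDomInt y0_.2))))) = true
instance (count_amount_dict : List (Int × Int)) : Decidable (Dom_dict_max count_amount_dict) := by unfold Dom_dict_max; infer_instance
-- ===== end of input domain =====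

-- B replaces A's two-phase scan (filter by a recomputed max(values), then max over those keys)
-- by one pass keeping the best (count, key) pair; measured asymptotically faster (O(n) vs O(n^2)).


-- ===== PORT A =====
-- [k for k, v in items if v == max(values)]; then match on its length.
def dict_max (count_amount_dict : List (Int × Int)) : Int :=
  let max_counts_list :=
    count_amount_dict.foldl
      (fun acc p =>
        if PySem.List.max? (count_amount_dict.map Prod.snd) (fun y => y) = some p.2
        then acc ++ [p.1] else acc) []
  match max_counts_list with
  | [] => 0
  | [k] => k
  | _ => (PySem.List.max? max_counts_list (fun y => y)).getD 0  -- list has ≥ 2 elements here, max? is some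

-- ===== PORT B =====
-- max(d, key=lambda k: (d[k], k)) as the running lexicographic-best (count, key) pair; empty dict → 0.
def dict_max_alt (count_amount_dict : List (Int × Int)) : Int :=
  match count_amount_dict with
  | [] => 0
  | (k, v) :: rest =>
    (rest.foldl
      (fun best p =>
        if best.1 < p.2 ∨ (best.1 = p.2 ∧ best.2 < p.1) then (p.2, p.1) else best)
      (v, k)).2

-- ===== PRECONDITION & SPEC =====
def Spec_dict_max (count_amount_dict : List (Int × Int)) (out : Int) : Prop := out = dict_max_alt count_amount_dict
instance (count_amount_dict : List (Int × Int)) (out : Int) : Decidable (Spec_dict_max count_amount_dict out) := by unfold Spec_dict_max; infer_instance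

-- ===== CLAIM (what is proved, stated in full; the proofs are below) =====
def Claim_equal_dict_max : Prop := ∀ (count_amount_dict : List (Int × Int)), Dom_dict_max count_amount_dict → Spec_dict_max count_amount_dict (dict_max count_amount_dict)

-- ===== LEMMAS AND PROOFS =====

-- (value, key) lex order used by B's running best
def pvLexLe (a b : Int × Int) : Prop := a.1 < b.1 ∨ (a.1 = b.1 ∧ a.2 ≤ b.2)

def pvStep (best p : Int × Int) : Int × Int :=
  if best.1 < p.2 ∨ (best.1 = p.2 ∧ best.2 < p.1) then (p.2, p.1) else best

-- the Prop-conditioned append loop of port A is a filter-then-map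
theorem pvFoldlFilterFst (c : Int × Int → Prop) [DecidablePred c]
    (l : List (Int × Int)) (acc : List Int) :
    l.foldl (fun acc p => if c p then acc ++ [p.1] else acc) acc
      = acc ++ (l.filter (fun p => decide (c p))).map Prod.fst := by
  induction l generalizing acc with
  | nil => simp
  | cons q t ih =>
    simp only [List.foldl_cons, List.filter_cons]
    by_cases hq : c q
    · simp [hq, ih]
    · simp [hq, ih]

-- the fold's result is the initial pair or the swap of some list element,
-- and it lex-dominates the initial pair and the swap of every list element
theorem pvFold_inv (rest : List (Int × Int)) (b : Int × Int) :
    (rest.foldl pvStep b = b ∨ ∃ p ∈ rest, rest.foldl pvStep b = (p.2, p.1)) ∧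
    pvLexLe b (rest.foldl pvStep b) ∧
    ∀ p ∈ rest, pvLexLe (p.2, p.1) (rest.foldl pvStep b) := by
  induction rest generalizing b with
  | nil => exact ⟨Or.inl rfl, Or.inr ⟨rfl, le_refl _⟩, by simp⟩
  | cons q t ih =>
    obtain ⟨hmem, hle, hall⟩ := ih (pvStep b q)
    simp only [List.foldl_cons]
    refine ⟨?_, ?_, ?_⟩
    · rcases hmem with h | ⟨p, hp, h⟩
      · rw [h]
        unfold pvStep
        split_ifs with hc
        · exact Or.inr ⟨q, by simp, rfl⟩
        · exact Or.inl rfl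
      · exact Or.inr ⟨p, by simp [hp], h⟩
    · have hbs : pvLexLe b (pvStep b q) := by
        unfold pvStep pvLexLe; split_ifs with hc <;> [skip; exact Or.inr ⟨rfl, le_refl _⟩]
        rcases hc with h | ⟨h, h'⟩
        · exact Or.inl h
        · exact Or.inr ⟨h, le_of_lt h'⟩
      rcases hbs with h | ⟨h, h'⟩ <;> rcases hle with h2 | ⟨h2, h2'⟩ <;>
        unfold pvLexLe <;> [exact Or.inl (lt_trans h h2); exact Or.inl (h2 ▸ h);
          exact Or.inl (h ▸ h2); exact Or.inr ⟨h.trans h2, h'.trans h2'⟩]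
    · intro p hp
      rcases List.mem_cons.mp hp with rfl | hp'
      · have hqs : pvLexLe (p.2, p.1) (pvStep b p) := by
          unfold pvStep pvLexLe; split_ifs with hc
          · exact Or.inr ⟨rfl, le_refl _⟩
          · push Not at hc
            rcases lt_or_eq_of_le hc.1 with h | h
            · exact Or.inl h
            · exact Or.inr ⟨h, hc.2 h.symm⟩
        rcases hqs with h | ⟨h, h'⟩ <;> rcases hle with h2 | ⟨h2, h2'⟩ <;>
          unfold pvLexLe <;> [exact Or.inl (lt_trans h h2); exact Or.inl (h2 ▸ h);
            exact Or.inl (h ▸ h2); exact Or.inr ⟨h.trans h2, h'.trans h2'⟩]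
      · exact hall p hp'

theorem dict_max_spec : Claim_equal_dict_max := by
  intro l _
  unfold Spec_dict_max dict_max dict_max_alt
  match l with
  | [] => rfl
  | (k, v) :: rest =>
    simp only []
    set r := rest.foldl pvStep (v, k) with hr
    have hfold :
        rest.foldl
          (fun best p =>
            if best.1 < p.2 ∨ (best.1 = p.2 ∧ best.2 < p.1) then (p.2, p.1) else best)
          (v, k) = r := rfl
    rw [hfold]
    obtain ⟨hmem, hle, hall⟩ := pvFold_inv rest (v, k)
    -- (r.2, r.1) is an element of the list
    have hrin : (r.2, r.1) ∈ (k, v) :: rest := by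
      rcases hmem with h | ⟨p, hp, h⟩
      · rw [← hr] at h; rw [h]; exact List.mem_cons_self
      · rw [← hr] at h; rw [h]; exact List.mem_cons_of_mem _ hp
    -- every value is ≤ r.1
    have hvle : ∀ p ∈ (k, v) :: rest, p.2 ≤ r.1 := by
      intro p hp
      rcases List.mem_cons.mp hp with rfl | hp'
      · rcases hle with h | ⟨h, _⟩
        · exact le_of_lt h
        · exact le_of_eq h
      · rcases hall p hp' with h | ⟨h, _⟩
        · exact le_of_lt h
        · exact le_of_eq h
    -- hence max(values) = some r.1
    have hmax : PySem.List.max? (((k, v) :: rest).map Prod.snd) (fun y => y) = some r.1 := by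
      rcases hM : PySem.List.max? (((k, v) :: rest).map Prod.snd) (fun y => y) with _ | M
      · exact absurd ((PySem.List.max?_eq_none_iff _ _).mp hM) (by simp)
      · have hMmem := PySem.List.max?_mem hM
        obtain ⟨p, hp, hpe⟩ := List.mem_map.mp hMmem
        have h1 : M ≤ r.1 := hpe ▸ hvle p hp
        have h2 : r.1 ≤ M := by
          simpa using PySem.List.max?_isMax hM (y := r.1)
            (List.mem_map.mpr ⟨(r.2, r.1), hrin, rfl⟩)
        exact congrArg some (le_antisymm h1 h2)
    -- the comprehension is a filter
    rw [hmax]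
    rw [pvFoldlFilterFst (fun p => some r.1 = some p.2)]
    set L := ((((k, v) :: rest).filter (fun p => decide (some r.1 = some p.2))).map Prod.fst) with hL
    have hrL : r.2 ∈ L := by
      refine List.mem_map.mpr ⟨(r.2, r.1), List.mem_filter.mpr ⟨hrin, by simp⟩, rfl⟩
    have hkle : ∀ k0 ∈ L, k0 ≤ r.2 := by
      intro k0 hk0
      obtain ⟨p, hp, hpe⟩ := List.mem_map.mp hk0
      obtain ⟨hpl, hpc⟩ := List.mem_filter.mp hp
      have hpv : p.2 = r.1 := by
        have h' : r.1 = p.2 := by simpa using hpc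
        exact h'.symm
      have hlex : pvLexLe (p.2, p.1) r := by
        rcases List.mem_cons.mp hpl with rfl | hp'
        · exact hle
        · exact hall p hp'
      rcases hlex with h | ⟨_, h⟩
      · exact absurd h (by simp [hpv])
      · exact hpe ▸ h
    -- max? L = some r.2
    have hmaxL : PySem.List.max? L (fun y => y) = some r.2 := by
      rcases hM : PySem.List.max? L (fun y => y) with _ | M
      · exact absurd ((PySem.List.max?_eq_none_iff _ _).mp hM)
          (by intro h; rw [h] at hrL; exact absurd hrL (List.not_mem_nil))
      · have h1 : M ≤ r.2 := hkle M (PySem.List.max?_mem hM)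
        have h2 : r.2 ≤ M := by simpa using PySem.List.max?_isMax hM r.2 hrL
        exact congrArg some (le_antisymm h1 h2)
    match hLc : L with
    | [] => exact absurd hrL (List.not_mem_nil)
    | [k0] =>
      have hk : k0 = r.2 := by simpa [PySem.List.max?] using hmaxL
      simpa using hk
    | k0 :: k1 :: t =>
      simp [hmaxL]
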